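-- pv_equiv track=rewrite | github.com/MrBrantCode/unitest_baseline | mut_generate/mist_train_taco/taco_4645/solution.py | calculate_median_sum
-- ===== SOURCE A (Python) =====
-- import bisect
--
-- def calculate_median_sum(numbers, modulo=100000):
--     def median(nums, k):
--         K = k + 1
--         return nums[(K // 2) - 1] if K % 2 == 0 else nums[((K + 1) // 2) - 1]
--
--     sorted_numbers = []
--     median_sum = 0
--
--     for k, number in enumerate(numbers):
--         bisect.insort(sorted_numbers, number)
--         median_sum += median(sorted_numbers, k)
--
--     return median_sum % modulo
-- ===== SOURCE B (Python) =====
-- import bisect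
--
-- def calculate_median_sum(numbers, modulo=100000):
--     # Two balanced sorted halves: lo holds the smaller half (its last element is
--     # the running lower median), hi the larger half; rebalance after each insert.
--     lo, hi, total = [], [], 0
--     for x in numbers:
--         if lo and x > lo[-1]:
--             bisect.insort(hi, x)
--         else:
--             bisect.insort(lo, x)
--         if len(lo) > len(hi) + 1:
--             hi.insert(0, lo.pop())
--         elif len(lo) < len(hi):
--             lo.append(hi.pop(0))
--         total += lo[-1]
--     return total % modulo
-- ===== Notes on version B (the rewrite author's own statement) =====
-- stated objective: alternative
-- what changed: A keeps one fully sorted list and re-derives the lower median by an index formula each step; B maintains two balanced sorted halves (lower half's last element IS the running median) and rebalances after each insert.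
import Mathlib
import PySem

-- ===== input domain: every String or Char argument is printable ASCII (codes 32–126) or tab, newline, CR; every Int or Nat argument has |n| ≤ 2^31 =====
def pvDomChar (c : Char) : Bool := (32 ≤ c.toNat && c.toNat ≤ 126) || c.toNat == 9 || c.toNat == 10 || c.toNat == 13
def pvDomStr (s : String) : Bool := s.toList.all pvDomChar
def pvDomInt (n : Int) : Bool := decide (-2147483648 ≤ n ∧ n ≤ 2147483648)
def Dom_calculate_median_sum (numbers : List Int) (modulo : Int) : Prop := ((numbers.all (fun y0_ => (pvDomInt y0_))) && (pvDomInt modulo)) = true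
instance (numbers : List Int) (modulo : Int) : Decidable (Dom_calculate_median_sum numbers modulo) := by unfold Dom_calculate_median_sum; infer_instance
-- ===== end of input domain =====

-- B maintains two balanced sorted halves (last of the lower half is the running lower median)
-- instead of A's single sorted list with an index formula: an alternative algorithm, same cost.


-- ===== PORT A =====
-- bisect.insort on a list of ints: ordered insert (for equal ints the insertion point is
-- value-invisible, so this is exact on Int values); shared by both ports, both call bisect.insort.
def pvInsort : List Int → Int → List Int
  | [], x => [x]
  | y :: ys, x => if x < y then x :: y :: ys else y :: pvInsort ys x

-- A's inner 'median' helper; the index is always in range (list nonempty), so pyGetD's default never fires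
def pvMedianA (nums : List Int) (k : Int) : Int :=
  let K := k + 1
  if PySem.Int.mod K 2 = 0 then PySem.List.pyGetD nums (PySem.Int.floordiv K 2 - 1) 0
  else PySem.List.pyGetD nums (PySem.Int.floordiv (K + 1) 2 - 1) 0

def pvStepA (st : List Int × Int) (p : Int × Int) : List Int × Int :=
  let s := pvInsort st.1 p.2
  (s, st.2 + pvMedianA s p.1)

def calculate_median_sum (numbers : List Int) (modulo : Int) : Int :=
  let r := (PySem.List.enumerate numbers 0).foldl pvStepA ([], 0)
  PySem.Int.mod r.2 modulo

-- ===== PORT B =====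
-- the two 'if len(lo) …' rebalancing branches of B's loop body
def pvRebalance (p : List Int × List Int) : List Int × List Int :=
  if p.2.length + 1 < p.1.length then
    (p.1.dropLast, p.1.getLast?.toList ++ p.2)            -- hi.insert(0, lo.pop())
  else if p.1.length < p.2.length then
    match p.2 with
    | h :: t => (p.1 ++ [h], t)                           -- lo.append(hi.pop(0))
    | [] => p
  else p

def pvStepB (st : List Int × List Int × Int) (x : Int) : List Int × List Int × Int :=
  let p1 :=
    match st.1.getLast? with
    | some m => if m < x then (st.1, pvInsort st.2.1 x) else (pvInsort st.1 x, st.2.1)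
    | none => (pvInsort st.1 x, st.2.1)
  let p2 := pvRebalance p1
  (p2.1, p2.2, st.2.2 + p2.1.getLast?.getD 0)

def calculate_median_sum_alt (numbers : List Int) (modulo : Int) : Int :=
  let r := numbers.foldl pvStepB ([], [], 0)
  PySem.Int.mod r.2.2 modulo

-- ===== PRECONDITION & SPEC =====
-- Python raises ZeroDivisionError on the final '% modulo' when modulo = 0
def Pre_calculate_median_sum (numbers : List Int) (modulo : Int) : Prop := modulo ≠ 0
instance (numbers : List Int) (modulo : Int) : Decidable (Pre_calculate_median_sum numbers modulo) := by unfold Pre_calculate_median_sum; infer_instance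
def pvWitness_calculate_median_sum : List Int × Int := ([3, 1, 2], 100000)

def Spec_calculate_median_sum (numbers : List Int) (modulo : Int) (out : Int) : Prop := out = calculate_median_sum_alt numbers modulo
instance (numbers : List Int) (modulo : Int) (out : Int) : Decidable (Spec_calculate_median_sum numbers modulo out) := by unfold Spec_calculate_median_sum; infer_instance

-- ===== CLAIM (what is proved, stated in full; the proofs are below) =====
def Claim_equal_calculate_median_sum : Prop := ∀ (numbers : List Int) (modulo : Int), Dom_calculate_median_sum numbers modulo → Pre_calculate_median_sum numbers modulo → Spec_calculate_median_sum numbers modulo (calculate_median_sum numbers modulo)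

-- ===== LEMMAS AND PROOFS =====

lemma length_pvInsort (s : List Int) (x : Int) : (pvInsort s x).length = s.length + 1 := by
  induction s with
  | nil => rfl
  | cons y ys ih => simp only [pvInsort]; split <;> simp [ih]

lemma perm_pvInsort (s : List Int) (x : Int) : (pvInsort s x).Perm (x :: s) := by
  induction s with
  | nil => rfl
  | cons y ys ih =>
    simp only [pvInsort]; split
    · rfl
    · exact (ih.cons y).trans (List.Perm.swap x y ys)

lemma mem_pvInsort {z x : Int} {s : List Int} : z ∈ pvInsort s x ↔ z = x ∨ z ∈ s := by
  rw [(perm_pvInsort s x).mem_iff]; simp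

lemma sorted_pvInsort {s : List Int} (hs : List.Pairwise (· ≤ ·) s) (x : Int) :
    List.Pairwise (· ≤ ·) (pvInsort s x) := by
  induction s with
  | nil => simp [pvInsort]
  | cons y ys ih =>
    simp only [pvInsort]
    rcases hs with - | ⟨hy, hys⟩
    split
    · rename_i hlt
      refine List.Pairwise.cons ?_ (List.Pairwise.cons hy hys)
      intro z hz
      rcases List.mem_cons.1 hz with rfl | hz
      · omega
      · exact le_of_lt (lt_of_lt_of_le hlt (hy z hz))
    · rename_i hnlt
      refine List.Pairwise.cons ?_ (ih hys)
      intro z hz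
      rcases mem_pvInsort.1 hz with rfl | hz
      · omega
      · exact hy z hz

lemma sorted_append_int {lo hi : List Int}
    (hlo : List.Pairwise (· ≤ ·) lo) (hhi : List.Pairwise (· ≤ ·) hi)
    (hcross : ∀ a ∈ lo, ∀ b ∈ hi, a ≤ b) : List.Pairwise (· ≤ ·) (lo ++ hi) :=
  List.pairwise_append.2 ⟨hlo, hhi, hcross⟩

lemma le_getLast_of_sorted {lo : List Int} (hs : List.Pairwise (· ≤ ·) lo)
    {a : Int} (ha : a ∈ lo) (h : lo ≠ []) : a ≤ lo.getLast h := by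
  induction lo with
  | nil => cases ha
  | cons y ys ih =>
    rcases hs with - | ⟨hy, hys⟩
    cases ys with
    | nil => simp_all
    | cons z zs =>
      rw [List.getLast_cons (by simp)]
      rcases ha with _ | ha
      · exact hy _ (List.getLast_mem (by simp))
      · exact ih hys (by assumption) (by simp)

-- extracting A's median from the split: the element at index |lo|-1 of lo ++ hi is lo's last
lemma median_extract (lo hi : List Int) (h : lo ≠ [])
    (hlen : lo.length = (lo.length + hi.length + 1) / 2) :
    pvMedianA (lo ++ hi) ((lo.length : Int) + hi.length - 1) = lo.getLast h := by
  have hL : 0 < lo.length := List.length_pos_iff.2 h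
  have hget : PySem.List.pyGetD (lo ++ hi) ((lo.length - 1 : Nat) : Int) 0 = lo.getLast h := by
    rw [PySem.List.pyGetD_natCast]
    have hlt : lo.length - 1 < (lo ++ hi).length := by simp; omega
    rw [List.getD_eq_getElem _ _ hlt, List.getElem_append_left (by omega),
      List.getLast_eq_getElem]
  set n := lo.length + hi.length with hn
  have hx : ((lo.length : Int) + hi.length - 1) + 1 = (n : Int) := by push_cast [hn]; ring
  unfold pvMedianA
  simp only [hx]
  by_cases hpar : n % 2 = 0
  · have hmod : PySem.Int.mod (n : Int) 2 = 0 := by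
      rw [show (2:Int) = ((2:Nat):Int) by norm_num, PySem.Int.mod_natCast]
      exact_mod_cast hpar
    rw [if_pos hmod, PySem.Int.floordiv_eq_ediv_of_pos (by omega)]
    have : ((n : Int)) / 2 - 1 = ((lo.length - 1 : Nat) : Int) := by push_cast [hn] <;> omega
    rw [this, hget]
  · have hmod : ¬ PySem.Int.mod (n : Int) 2 = 0 := by
      rw [show (2:Int) = ((2:Nat):Int) by norm_num, PySem.Int.mod_natCast]
      exact_mod_cast fun hh => hpar (by exact_mod_cast hh)
    rw [if_neg hmod, PySem.Int.floordiv_eq_ediv_of_pos (by omega)]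
    have : ((n : Int) + 1) / 2 - 1 = ((lo.length - 1 : Nat) : Int) := by push_cast [hn] <;> omega
    rw [this, hget]

lemma medianA_singleton (x : Int) : pvMedianA [x] 0 = x := by
  unfold pvMedianA
  norm_num [show PySem.Int.mod 1 2 = 1 from by decide,
    show PySem.Int.floordiv 2 2 = 1 from by decide, PySem.List.pyGetD_zero_cons]

lemma pvRebalance_spec (lo1 hi1 : List Int) (hne : lo1 ≠ [])
    (hlow : hi1.length ≤ lo1.length + 1) (hhigh : lo1.length ≤ hi1.length + 2) :
    pvRebalance (lo1, hi1) = ((pvRebalance (lo1, hi1)).1, (pvRebalance (lo1, hi1)).2)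
    ∧ (pvRebalance (lo1, hi1)).1 ++ (pvRebalance (lo1, hi1)).2 = lo1 ++ hi1
    ∧ (pvRebalance (lo1, hi1)).1.length = (lo1.length + hi1.length + 1) / 2
    ∧ (pvRebalance (lo1, hi1)).1 ≠ [] := by
  have hL : 0 < lo1.length := List.length_pos_iff.2 hne
  refine ⟨rfl, ?_⟩
  unfold pvRebalance
  dsimp only
  split_ifs with h1 h2
  · -- move lo's last to the front of hi
    rw [List.getLast?_eq_some_getLast hne]
    refine ⟨?_, ?_, ?_⟩
    · show lo1.dropLast ++ ([lo1.getLast hne] ++ hi1) = lo1 ++ hi1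
      rw [← List.append_assoc, List.dropLast_append_getLast hne]
    · simp only [List.length_dropLast]; omega
    · refine List.ne_nil_of_length_pos ?_
      simp only [List.length_dropLast]; omega
  · -- move hi's head to the end of lo
    cases hi1 with
    | nil => exact absurd h2 (by simp)
    | cons h tl =>
      refine ⟨?_, ?_, by simp⟩
      · show (lo1 ++ [h]) ++ tl = lo1 ++ h :: tl
        simp
      · show (lo1 ++ [h]).length = (lo1.length + (h :: tl).length + 1) / 2
        have e1 : (h :: tl).length = tl.length + 1 := rfl
        have e2 : (lo1 ++ [h]).length = lo1.length + 1 := by simp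
        rw [e1] at h2 hlow hhigh
        rw [e1, e2]
        omega
  · exact ⟨rfl, by show lo1.length = (lo1.length + hi1.length + 1) / 2; omega, hne⟩

lemma pvInsort_ne_nil (s : List Int) (x : Int) : pvInsort s x ≠ [] :=
  List.ne_nil_of_length_pos (by rw [length_pvInsort]; omega)

-- after a one-sided insert, rebalancing restores the split invariant and
-- the last element of the lower half is exactly A's median of the inserted list
lemma combine_rebalance (lo1 hi1 s : List Int) (x : Int) (hne1 : lo1 ≠ [])
    (heq : lo1 ++ hi1 = pvInsort s x)
    (hlow : hi1.length ≤ lo1.length + 1) (hhigh : lo1.length ≤ hi1.length + 2) :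
    (pvRebalance (lo1, hi1)).1.getLast?.getD 0 = pvMedianA (pvInsort s x) ((s.length : Nat) : Int)
    ∧ (pvRebalance (lo1, hi1)).1 ++ (pvRebalance (lo1, hi1)).2 = pvInsort s x
    ∧ (pvRebalance (lo1, hi1)).1.length = ((pvInsort s x).length + 1) / 2 := by
  obtain ⟨-, hcc0, hlenr, hner⟩ := pvRebalance_spec lo1 hi1 hne1 hlow hhigh
  have hcc : (pvRebalance (lo1, hi1)).1 ++ (pvRebalance (lo1, hi1)).2 = pvInsort s x :=
    hcc0.trans heq
  have hsum : (pvRebalance (lo1, hi1)).1.length + (pvRebalance (lo1, hi1)).2.length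
      = s.length + 1 := by
    have := congrArg List.length hcc
    simpa [List.length_append, length_pvInsort] using this
  have hsum0 : lo1.length + hi1.length = s.length + 1 := by
    have := congrArg List.length heq
    simpa [List.length_append, length_pvInsort] using this
  have hlen'' : (pvRebalance (lo1, hi1)).1.length
      = ((pvRebalance (lo1, hi1)).1.length + (pvRebalance (lo1, hi1)).2.length + 1) / 2 := by
    omega
  have hME := median_extract (pvRebalance (lo1, hi1)).1 (pvRebalance (lo1, hi1)).2 hner hlen''
  have hidx : ((pvRebalance (lo1, hi1)).1.length : Int) + (pvRebalance (lo1, hi1)).2.length - 1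
      = ((s.length : Nat) : Int) := by push_cast; omega
  refine ⟨?_, hcc, by rw [length_pvInsort]; omega⟩
  rw [List.getLast?_eq_some_getLast hner, Option.getD_some, ← hME, hcc, hidx]

-- one step of B matches one step of A: it yields the same added median and
-- re-establishes the split invariant on the inserted list
lemma stepB_spec (lo hi : List Int) (x t : Int)
    (hs : List.Pairwise (· ≤ ·) (lo ++ hi))
    (hlen : lo.length = ((lo ++ hi).length + 1) / 2) :
    ∃ lo' hi', pvStepB (lo, hi, t) x
        = (lo', hi', t + pvMedianA (pvInsort (lo ++ hi) x) ((lo ++ hi).length : Int))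
      ∧ lo' ++ hi' = pvInsort (lo ++ hi) x
      ∧ lo'.length = ((pvInsort (lo ++ hi) x).length + 1) / 2 := by
  rw [List.length_append] at hlen
  rcases eq_or_ne lo [] with rfl | hne
  · -- empty state: hi is empty too, the new element is the median
    have hhi : hi = [] := List.length_eq_zero_iff.1 (by simp at hlen; omega)
    subst hhi
    refine ⟨[x], [], ?_, by simp [pvInsort], by simp [pvInsort]⟩
    show pvStepB ([], [], t) x = ([x], [], t + pvMedianA [x] ((0 : Nat) : Int))
    norm_num [pvStepB, pvRebalance, pvInsort, medianA_singleton]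
  · have hsome : lo.getLast? = some (lo.getLast hne) := List.getLast?_eq_some_getLast hne
    obtain ⟨hslo, hshi, hcross⟩ := List.pairwise_append.1 hs
    by_cases hx : lo.getLast hne < x
    · -- x goes into the upper half
      have hunf : pvStepB (lo, hi, t) x
          = ((pvRebalance (lo, pvInsort hi x)).1, (pvRebalance (lo, pvInsort hi x)).2,
             t + (pvRebalance (lo, pvInsort hi x)).1.getLast?.getD 0) := by
        unfold pvStepB; rw [hsome]; dsimp only; rw [if_pos hx]
      have hsort1 : List.Pairwise (· ≤ ·) (lo ++ pvInsort hi x) := by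
        refine sorted_append_int hslo (sorted_pvInsort hshi x) ?_
        intro a ha b hb
        rcases mem_pvInsort.1 hb with rfl | hb
        · exact le_of_lt (lt_of_le_of_lt (le_getLast_of_sorted hslo ha hne) hx)
        · exact hcross a ha b hb
      have hperm : (lo ++ pvInsort hi x).Perm (x :: (lo ++ hi)) :=
        ((perm_pvInsort hi x).append_left lo).trans List.perm_middle
      have heq : lo ++ pvInsort hi x = pvInsort (lo ++ hi) x :=
        List.Perm.eq_of_pairwise (fun _ _ _ _ => le_antisymm)
          hsort1 (sorted_pvInsort hs x) (hperm.trans (perm_pvInsort (lo ++ hi) x).symm)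
      obtain ⟨hmed, hcc, hlenf⟩ := combine_rebalance lo (pvInsort hi x) (lo ++ hi) x hne heq
        (by rw [length_pvInsort]; omega) (by rw [length_pvInsort]; omega)
      exact ⟨_, _, by rw [hunf, hmed], hcc, hlenf⟩
    · -- x goes into the lower half
      have hunf : pvStepB (lo, hi, t) x
          = ((pvRebalance (pvInsort lo x, hi)).1, (pvRebalance (pvInsort lo x, hi)).2,
             t + (pvRebalance (pvInsort lo x, hi)).1.getLast?.getD 0) := by
        unfold pvStepB; rw [hsome]; dsimp only; rw [if_neg hx]
      have hsort1 : List.Pairwise (· ≤ ·) (pvInsort lo x ++ hi) := by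
        refine sorted_append_int (sorted_pvInsort hslo x) hshi ?_
        intro a ha b hb
        rcases mem_pvInsort.1 ha with rfl | ha
        · exact le_trans (not_lt.1 hx) (hcross _ (List.getLast_mem hne) b hb)
        · exact hcross a ha b hb
      have hperm : (pvInsort lo x ++ hi).Perm (x :: (lo ++ hi)) :=
        ((perm_pvInsort lo x).append_right hi).trans (by rw [List.cons_append])
      have heq : pvInsort lo x ++ hi = pvInsort (lo ++ hi) x :=
        List.Perm.eq_of_pairwise (fun _ _ _ _ => le_antisymm)
          hsort1 (sorted_pvInsort hs x) (hperm.trans (perm_pvInsort (lo ++ hi) x).symm)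
      obtain ⟨hmed, hcc, hlenf⟩ := combine_rebalance (pvInsort lo x) hi (lo ++ hi) x
        (pvInsort_ne_nil lo x) heq
        (by rw [length_pvInsort]; omega) (by rw [length_pvInsort]; omega)
      exact ⟨_, _, by rw [hunf, hmed], hcc, hlenf⟩

lemma main_loop (xs : List Int) : ∀ (s lo hi : List Int) (t : Int),
    List.Pairwise (· ≤ ·) s → lo ++ hi = s → lo.length = (s.length + 1) / 2 →
    ((PySem.List.enumerate xs (s.length : Int)).foldl pvStepA (s, t)).2
      = (xs.foldl pvStepB (lo, hi, t)).2.2 := by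
  induction xs with
  | nil => intro s lo hi t _ _ _; simp [PySem.List.enumerate]
  | cons x xs ih =>
    intro s lo hi t hs hsplit hlen
    subst hsplit
    rw [PySem.List.enumerate_cons]
    obtain ⟨lo', hi', hB, hsplit', hlen'⟩ := stepB_spec lo hi x t hs hlen
    simp only [List.foldl_cons, hB]
    have hstepA : pvStepA (lo ++ hi, t) ((lo ++ hi).length, x)
        = (pvInsort (lo ++ hi) x, t + pvMedianA (pvInsort (lo ++ hi) x) ((lo ++ hi).length : Int)) := rfl
    rw [hstepA]
    have hlenS : ((pvInsort (lo ++ hi) x).length : Int) = ((lo ++ hi).length : Int) + 1 := by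
      rw [length_pvInsort]; push_cast; ring
    have := ih (pvInsort (lo ++ hi) x) lo' hi'
      (t + pvMedianA (pvInsort (lo ++ hi) x) ((lo ++ hi).length : Int))
      (sorted_pvInsort hs x) hsplit' hlen'
    rw [← hlenS]
    exact this

-- ===== VERDICT (by name: the statement is the Claim_ definition above) =====
theorem calculate_median_sum_spec : Claim_equal_calculate_median_sum := by
  intro numbers modulo _ _
  unfold Spec_calculate_median_sum calculate_median_sum calculate_median_sum_alt
  have h := main_loop numbers [] [] [] 0 (by simp) rfl rfl
  simp only [List.length_nil, Nat.cast_zero] at h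
  show PySem.Int.mod ((PySem.List.enumerate numbers 0).foldl pvStepA ([], 0)).2 modulo
    = PySem.Int.mod (numbers.foldl pvStepB ([], [], 0)).2.2 modulo
  rw [h]
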